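-- pv_equiv track=rewrite | github.com/Arka-Dutta-28/story2img | utils/sanity_check_constraint.py | _char_descriptions_for_scene
-- ===== SOURCE A (Python) =====
-- from typing import Any
--
-- def _char_descriptions_for_scene(
--     characters: list[dict[str, Any]],
--     chars_present: list[str],
-- ) -> dict[str, str]:
--     """
--     Map scene character names to parser-provided descriptions.
--
--     Parameters
--     ----------
--     characters : list[dict[str, Any]]
--         Character records with ``name`` and optional ``description``.
--     chars_present : list[str]
--         Names appearing in the current scene.
--
--     Returns
--     -------
--     dict[str, str]
--         ``name -> description`` for each name in ``chars_present`` (default ``""``).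
--
--     Notes
--     -----
--     Builds an intermediate dict from ``characters`` then projects onto
--     ``chars_present``.
--
--     Edge cases
--     ----------
--     Names absent from ``characters`` yield empty string values.
--     """
--     by_name = {
--         c["name"]: c.get("description", "")
--         for c in characters
--         if c.get("name")
--     }
--     return {name: by_name.get(name, "") for name in chars_present}
-- ===== SOURCE B (Python) =====
-- def _char_descriptions_for_scene(
--     characters: list,
--     chars_present: list,
-- ) -> dict:
--     """For each scene name, scan characters in reverse and take the first
--     matching record's description (= last-wins), with no intermediate index."""
--     result = {}
--     for name in chars_present:
--         desc = ""
--         for c in reversed(characters):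
--             n = c.get("name")
--             if n and n == name:
--                 desc = c.get("description", "")
--                 break
--         result[name] = desc
--     return result
-- ===== Notes on version B (the rewrite author's own statement) =====
-- stated objective: alternative
-- what changed: B builds no name->description index at all: for each scene name it scans the characters list in reverse and takes the first matching record's description (equivalent to A's last-wins dict overwrite), trading A's hash index for a direct nested reverse scan.
import Mathlib
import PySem

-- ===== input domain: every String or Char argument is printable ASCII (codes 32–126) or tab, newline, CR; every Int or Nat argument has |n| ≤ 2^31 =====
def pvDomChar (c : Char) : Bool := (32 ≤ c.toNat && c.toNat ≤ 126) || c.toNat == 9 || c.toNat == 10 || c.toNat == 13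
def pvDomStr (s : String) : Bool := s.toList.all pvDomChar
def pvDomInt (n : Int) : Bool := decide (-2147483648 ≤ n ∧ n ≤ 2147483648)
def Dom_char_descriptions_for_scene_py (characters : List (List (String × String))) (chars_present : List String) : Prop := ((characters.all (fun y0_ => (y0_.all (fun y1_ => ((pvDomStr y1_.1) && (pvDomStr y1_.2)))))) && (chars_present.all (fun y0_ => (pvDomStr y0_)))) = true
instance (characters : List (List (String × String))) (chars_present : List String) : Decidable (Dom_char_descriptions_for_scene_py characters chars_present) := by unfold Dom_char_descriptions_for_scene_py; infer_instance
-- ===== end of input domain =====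

-- B builds no name->description index: for each scene name it scans characters in
-- reverse, taking the first matching record's description (alternative algorithm, not faster).


-- ===== PORT A =====
-- A: by_name = {c["name"]: c.get("description","") for c in characters if c.get("name")};
--    return {name: by_name.get(name,"") for name in chars_present}
def char_descriptions_for_scene_py (characters : List (List (String × String))) (chars_present : List String) : List (String × String) :=
  let by_name : PySem.Dict String String :=
    characters.foldl (fun d c =>
      match (PySem.Dict.mk c).get? "name" with
      | some n => if n ≠ "" then d.insert n ((PySem.Dict.mk c).getD "description" "") else d
      | none => d) PySem.Dict.empty
  (chars_present.foldl (fun r name => r.insert name (by_name.getD name "")) PySem.Dict.empty).items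

-- ===== PORT B =====
-- B's inner loop: 'for c in reversed(characters): n = c.get("name");
--                  if n and n == name: desc = c.get("description",""); break'
-- ported as structural recursion over the reversed list (the break = stop at first match)
def pvScanRev (cs : List (List (String × String))) (name : String) : String :=
  match cs with
  | [] => ""
  | c :: rest =>
    match (PySem.Dict.mk c).get? "name" with
    | some n => if n ≠ "" ∧ n = name then (PySem.Dict.mk c).getD "description" "" else pvScanRev rest name
    | none => pvScanRev rest name

-- B: result = {}; for name in chars_present: result[name] = <reverse scan>; return result
def char_descriptions_for_scene_py_alt (characters : List (List (String × String))) (chars_present : List String) : List (String × String) :=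
  (chars_present.foldl (fun r name => r.insert name (pvScanRev characters.reverse name)) PySem.Dict.empty).items

-- ===== PRECONDITION & SPEC =====
def Spec_char_descriptions_for_scene_py (characters : List (List (String × String))) (chars_present : List String) (out : List (String × String)) : Prop := out = char_descriptions_for_scene_py_alt characters chars_present
instance (characters : List (List (String × String))) (chars_present : List String) (out : List (String × String)) : Decidable (Spec_char_descriptions_for_scene_py characters chars_present out) := by unfold Spec_char_descriptions_for_scene_py; infer_instance

-- ===== CLAIM (what is proved, stated in full; the proofs are below) =====
def Claim_equal_char_descriptions_for_scene_py : Prop := ∀ (characters : List (List (String × String))) (chars_present : List String), Dom_char_descriptions_for_scene_py characters chars_present → Spec_char_descriptions_for_scene_py characters chars_present (char_descriptions_for_scene_py characters chars_present)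

-- ===== LEMMAS AND PROOFS =====

-- effective key of a character record: its "name" value if present and truthy
def pvKeyOf (c : List (String × String)) : Option String :=
  match (PySem.Dict.mk c).get? "name" with
  | some n => if n ≠ "" then some n else none
  | none => none

def pvDescOf (c : List (String × String)) : String :=
  (PySem.Dict.mk c).getD "description" ""

-- value at key k after scanning cs forward, starting from v (last matching record wins)
def pvVal (cs : List (List (String × String))) (k : String) (v : String) : String :=
  cs.foldl (fun v c => match pvKeyOf c with
    | some n => if n = k then pvDescOf c else v
    | none => v) v

lemma getD_A_fold (cs : List (List (String × String))) (d : PySem.Dict String String) (k : String) :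
    (cs.foldl (fun d c =>
      match (PySem.Dict.mk c).get? "name" with
      | some n => if n ≠ "" then d.insert n ((PySem.Dict.mk c).getD "description" "") else d
      | none => d) d).getD k "" = pvVal cs k (d.getD k "") := by
  induction cs generalizing d with
  | nil => rfl
  | cons c cs ih =>
    rw [List.foldl_cons]
    cases h : (PySem.Dict.mk c).get? "name" with
    | none =>
      simp only [h]
      rw [ih]
      simp [pvVal, pvKeyOf, h]
    | some n =>
      by_cases hn : n = ""
      · subst hn
        simp only [h]
        rw [if_neg (by simp)]
        rw [ih]
        simp [pvVal, pvKeyOf, h]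
      · simp only [h]
        rw [if_pos hn]
        rw [ih]
        have hstep : pvVal (c :: cs) k (d.getD k "")
            = pvVal cs k (if n = k then pvDescOf c else d.getD k "") := by
          simp [pvVal, pvKeyOf, h, hn]
        rw [hstep, PySem.Dict.getD_insert]
        by_cases hk : n = k
        · simp [hk, pvDescOf]
        · have hk' : ¬ k = n := fun e => hk e.symm
          simp [hk, hk']

-- first match on the reversed list = last match on the forward list
lemma scanRev_eq_pvVal (cs : List (List (String × String))) (k : String) :
    pvScanRev cs.reverse k = pvVal cs k "" := by
  induction cs using List.reverseRecOn with
  | nil => rfl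
  | append_singleton l c ih =>
    rw [List.reverse_append, List.reverse_singleton, List.singleton_append]
    show pvScanRev (c :: l.reverse) k = _
    have hval : pvVal (l ++ [c]) k "" =
        (match pvKeyOf c with
         | some n => if n = k then pvDescOf c else pvVal l k ""
         | none => pvVal l k "") := by
      simp [pvVal, List.foldl_append]
    rw [hval, pvScanRev]
    cases h : (PySem.Dict.mk c).get? "name" with
    | none => simp [pvKeyOf, h, ih]
    | some n =>
      by_cases hn : n = ""
      · simp [pvKeyOf, h, hn, ih]
      · by_cases hk : n = k
        · subst hk; simp [pvKeyOf, h, hn, pvDescOf]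
        · simp [pvKeyOf, h, hn, hk, ih]

-- value invariant of a fold of inserts whose value depends only on the key
lemma items_val_foldl_insert (f : String → String) (l : List String)
    (d : PySem.Dict String String) (hd : ∀ p ∈ d.items, p.2 = f p.1) :
    ∀ p ∈ l.foldl (fun r n => r.insert n (f n)) d |>.items, p.2 = f p.1 := by
  induction l generalizing d with
  | nil => exact hd
  | cons n l ih =>
    rw [List.foldl_cons]
    apply ih
    intro p hp
    rcases (PySem.Dict.mem_items_insert d n (f n) p).1 hp with h | h
    · rw [h]
    · exact hd p h.1

-- a list of pairs whose snd is determined by fst is the map of its fsts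
lemma list_eq_map_fst (f : String → String) (l : List (String × String))
    (h : ∀ p ∈ l, p.2 = f p.1) :
    l = (l.map (·.1)).map (fun k => (k, f k)) := by
  induction l with
  | nil => rfl
  | cons p l ih =>
    simp only [List.map_cons]
    refine List.cons_eq_cons.2 ⟨?_, ih fun q hq => h q (by simp [hq])⟩
    have hp := h p (by simp)
    exact Prod.ext rfl hp

lemma items_keyed_fold (f : String → String) (l : List String) :
    (l.foldl (fun r n => r.insert n (f n)) PySem.Dict.empty).items
      = (PySem.Set.update [] l).map (fun k => (k, f k)) := by
  have hkeys := PySem.Dict.keys_foldl_insert l (fun _ n => f n) (PySem.Dict.empty (κ := String) (ν := String))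
  rw [PySem.Dict.keys_empty] at hkeys
  have hval := items_val_foldl_insert f l PySem.Dict.empty (by simp [PySem.Dict.empty])
  rw [list_eq_map_fst f _ hval]
  have hk2 : ((l.foldl (fun r n => r.insert n (f n)) PySem.Dict.empty).items.map (·.1))
      = PySem.Set.update [] l := by
    rw [← hkeys]; simp [PySem.Dict.keys]
  rw [hk2]

-- ===== VERDICT (by name: the statement is the Claim_ definition above) =====
theorem char_descriptions_for_scene_py_spec : Claim_equal_char_descriptions_for_scene_py := by
  intro characters chars_present _
  unfold Spec_char_descriptions_for_scene_py
  unfold char_descriptions_for_scene_py char_descriptions_for_scene_py_alt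
  set by_name : PySem.Dict String String :=
    characters.foldl (fun d c =>
      match (PySem.Dict.mk c).get? "name" with
      | some n => if n ≠ "" then d.insert n ((PySem.Dict.mk c).getD "description" "") else d
      | none => d) PySem.Dict.empty with hby
  rw [items_keyed_fold (fun name => by_name.getD name "") chars_present,
      items_keyed_fold (fun name => pvScanRev characters.reverse name) chars_present]
  apply List.map_congr_left; intro k _
  rw [hby, getD_A_fold, scanRev_eq_pvVal]
  simp [PySem.Dict.getD_empty]
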